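-- pv_equiv track=rewrite | github.com/chusehwan/home_py | baekjun/함수/한수.py | judge_num
-- ===== SOURCE A (Python) =====
-- def check_list(han_li):
--     # list상 index 바탕 각 수사이의 차이 수가 일정한지 검토( [1,0,0] = 한수아님, [1,0,1] =한수아님, [1,1,1] = 한수, ....[1,2,3] = 한수)
--     compare_list = []
--     len_of_han_li = len(han_li)
--     for i in range(len_of_han_li):
--         if i+1 < len_of_han_li:
--             compare_list.append(int(han_li[i+1])-int(han_li[i]))
--     for i in compare_list:
--         if compare_list[0] != i:
--             return '한수아님'
--     return '한수'
--
-- def judge_num(num):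
--     if num < 100:
--         return '한수'
--     str_num = str(num)
--     # 두자리 이상일경우 list를 만들어서 각 자리수를 list에 저장
--     han_list = []
--     for i in str_num:
--         han_list.append(i)
--     result = check_list(han_list)
--     return result
-- ===== SOURCE B (Python) =====
-- def judge_num(num):
--     if num < 100:
--         return '한수'
--     digits = [int(c) for c in str(num)]
--     if all(2 * digits[i] == digits[i - 1] + digits[i + 1]
--            for i in range(1, len(digits) - 1)):
--         return '한수'
--     return '한수아님'
-- ===== Notes on version B (the rewrite author's own statement) =====
-- stated objective: simpler
-- what changed: B drops the helper and the intermediate adjacent-difference list with its two index loops, testing the arithmetic property directly in one pass: for every interior digit, twice that digit must equal the sum of its two neighbours.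
import Mathlib
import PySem

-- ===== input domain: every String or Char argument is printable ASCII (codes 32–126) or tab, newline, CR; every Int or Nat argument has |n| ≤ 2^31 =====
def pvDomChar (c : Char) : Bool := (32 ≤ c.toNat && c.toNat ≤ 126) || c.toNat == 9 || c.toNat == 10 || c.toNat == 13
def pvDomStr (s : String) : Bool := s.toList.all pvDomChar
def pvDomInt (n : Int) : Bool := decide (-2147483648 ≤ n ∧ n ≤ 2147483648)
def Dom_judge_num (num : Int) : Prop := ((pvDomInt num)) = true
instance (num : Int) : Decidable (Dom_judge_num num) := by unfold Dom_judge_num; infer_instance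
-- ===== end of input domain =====

-- B replaces A's helper and intermediate adjacent-difference list (two index loops) by one
-- direct pass checking the second-difference condition on interior digits; objective: simpler.

-- ===== PORT A =====
-- int(c) for one character: exact for the digit characters '0'..'9', the only ones reached
-- (both programs only convert characters of str(num) with num ≥ 100).
def pvCharInt (c : Char) : Int := (c.toNat : Int) - 48

-- the second loop of check_list with its early return '한수아님'
def pvCheckLoop (compare_list : List Int) : List Int → String
  | [] => "한수"
  | i :: rest =>
    if PySem.List.pyGetD compare_list 0 0 ≠ i then "한수아님"
    else pvCheckLoop compare_list rest

def check_list (han_li : List Char) : String :=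
  let len_of_han_li : Int := (han_li.length : Int)
  let compare_list : List Int :=
    (PySem.List.pyRange 0 len_of_han_li 1).foldl
      (fun acc i =>
        if i + 1 < len_of_han_li then
          acc ++ [pvCharInt (PySem.List.pyGetD han_li (i + 1) ' ')
                  - pvCharInt (PySem.List.pyGetD han_li i ' ')]
        else acc) []
  pvCheckLoop compare_list compare_list

def judge_num (num : Int) : String :=
  if num < 100 then "한수"
  else
    let str_num := PySem.Int.toChars num
    let han_list := str_num.foldl (fun acc i => acc ++ [i]) []
    check_list han_list

-- ===== PORT B =====
def judge_num_alt (num : Int) : String :=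
  if num < 100 then "한수"
  else
    let digits := (PySem.Int.toChars num).map pvCharInt
    if (PySem.List.pyRange 1 ((digits.length : Int) - 1) 1).all
        (fun i => 2 * PySem.List.pyGetD digits i 0
              == PySem.List.pyGetD digits (i - 1) 0 + PySem.List.pyGetD digits (i + 1) 0)
    then "한수" else "한수아님"

-- ===== PRECONDITION & SPEC =====
def Spec_judge_num (num : Int) (out : String) : Prop := out = judge_num_alt num
instance (num : Int) (out : String) : Decidable (Spec_judge_num num out) := by unfold Spec_judge_num; infer_instance

-- ===== CLAIM (what is proved, stated in full; the proofs are below) =====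
def Claim_equal_judge_num : Prop := ∀ (num : Int), Dom_judge_num num → Spec_judge_num num (judge_num num)

-- ===== LEMMAS AND PROOFS =====

lemma pv_checkLoop_eq (c l : List Int) :
    pvCheckLoop c l =
      (if l.all (fun i => PySem.List.pyGetD c 0 0 == i) then "한수" else "한수아님") := by
  induction l with
  | nil => rfl
  | cons x rest ih =>
    simp only [pvCheckLoop, List.all_cons, Bool.and_eq_true, beq_iff_eq]
    by_cases h : PySem.List.pyGetD c 0 0 = x
    · simp [h, ih]
    · simp [h]

lemma pv_filter_pyRange (a n : Int) :
    (PySem.List.pyRange a n 1).filter (fun i => decide (i + 1 < n)) =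
      PySem.List.pyRange a (n - 1) 1 := by
  by_cases h : n ≤ a
  · rw [PySem.List.pyRange_one_eq_nil h, PySem.List.pyRange_one_eq_nil (by omega)]
    rfl
  · have h' : a < n := by omega
    rw [PySem.List.pyRange_one_cons h']
    by_cases h2 : a + 1 < n
    · rw [PySem.List.pyRange_one_cons (by omega : a < n - 1)]
      simp only [List.filter_cons, decide_eq_true_eq, if_pos h2]
      congr 1
      exact pv_filter_pyRange (a + 1) n
    · have hn : n = a + 1 := by omega
      subst hn
      rw [PySem.List.pyRange_one_eq_nil (by omega : a + 1 ≤ a + 1),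
          PySem.List.pyRange_one_eq_nil (by omega : a + 1 - 1 ≤ a)]
      simp
termination_by (n - a).toNat
decreasing_by omega

-- chain-equal implies equal-to-first, on Nat indices
lemma pv_chain_to_first (G : Nat → Int) (M : Nat)
    (h : ∀ k : Nat, k + 1 < M → G (k + 1) = G k) :
    ∀ k : Nat, k < M → G k = G 0 := by
  intro k
  induction k with
  | zero => intro _; rfl
  | succ k ih =>
    intro hk
    rw [h k hk, ih (by omega)]

-- the central fact: check_list on any char list equals B's second-difference test
lemma pv_getD_map (cs : List Char) (i : Int) (h0 : 0 ≤ i) (h1 : i < (cs.length : Int)) :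
    PySem.List.pyGetD (cs.map pvCharInt) i 0 = pvCharInt (PySem.List.pyGetD cs i ' ') := by
  rw [PySem.List.pyGetD_eq_getElem _ _ h0 (by simp; omega),
      PySem.List.pyGetD_eq_getElem _ _ h0 h1]
  simp

lemma pv_bool_bridge {bA bB : Bool} (h1 : bB = false → bA = false)
    (h2 : bB = true → bA = true) : (bA = true) = (bB = true) := by
  cases bA <;> cases bB <;> simp_all

lemma pv_check_eq (cs : List Char) :
    check_list cs =
      (if (PySem.List.pyRange 1 (((cs.map pvCharInt).length : Int) - 1) 1).all
          (fun i => 2 * PySem.List.pyGetD (cs.map pvCharInt) i 0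
                == PySem.List.pyGetD (cs.map pvCharInt) (i - 1) 0
                   + PySem.List.pyGetD (cs.map pvCharInt) (i + 1) 0)
        then "한수" else "한수아님") := by
  unfold check_list
  dsimp only
  set n : Int := (cs.length : Int) with hn
  set g : Int → Int := fun i =>
    pvCharInt (PySem.List.pyGetD cs (i + 1) ' ') - pvCharInt (PySem.List.pyGetD cs i ' ')
    with hg
  have hfun : (fun (acc : List Int) (i : Int) =>
        if i + 1 < n then
          acc ++ [pvCharInt (PySem.List.pyGetD cs (i + 1) ' ')
                  - pvCharInt (PySem.List.pyGetD cs i ' ')]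
        else acc)
      = (fun (acc : List Int) (i : Int) =>
          if (fun j => decide (j + 1 < n)) i = true then acc ++ [g i] else acc) := by
    funext acc i; simp [hg]
  rw [hfun, PySem.List.foldl_append_if, List.nil_append, pv_filter_pyRange, pv_checkLoop_eq]
  congr 1
  rw [List.length_map, ← hn]
  by_cases hsmall : n ≤ 1
  · -- at most one digit: both ranges empty, both sides true
    rw [PySem.List.pyRange_one_eq_nil (by omega : n - 1 ≤ 0),
        PySem.List.pyRange_one_eq_nil (by omega : n - 1 ≤ 1)]
    rfl
  · -- n ≥ 2: first element of the difference list is g 0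
    have hhead : PySem.List.pyGetD ((PySem.List.pyRange 0 (n - 1) 1).map g) 0 0 = g 0 :=
      PySem.List.pyGetD_map_pyRange_of_nonneg g (n - 1) 0 0 le_rfl (by omega)
    rw [hhead]
    -- B's test at an interior index i is exactly "g i = g (i-1)"
    have hstep : ∀ i : Int, 1 ≤ i → i < n - 1 →
        ((2 * PySem.List.pyGetD (cs.map pvCharInt) i 0
          == PySem.List.pyGetD (cs.map pvCharInt) (i - 1) 0
             + PySem.List.pyGetD (cs.map pvCharInt) (i + 1) 0) = true
          ↔ g i = g (i - 1)) := by
      intro i h1 h2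
      rw [pv_getD_map cs i (by omega) (by omega),
          pv_getD_map cs (i - 1) (by omega) (by omega),
          pv_getD_map cs (i + 1) (by omega) (by omega)]
      simp only [beq_iff_eq, hg]
      have he : i - 1 + 1 = i := by omega
      rw [he]
      constructor <;> intro h <;> linarith
    apply pv_bool_bridge
    · -- B false → A false
      intro hB
      rw [List.all_eq_false] at hB
      obtain ⟨i, hi, hfail⟩ := hB
      rw [PySem.List.mem_pyRange_one] at hi
      rw [List.all_eq_false]
      have hgi : g i ≠ g (i - 1) := fun he =>
        hfail (by rw [hstep i (by omega) (by omega)]; exact he)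
      by_cases he0 : g i = g 0
      · refine ⟨g (i - 1), List.mem_map_of_mem ?_,
          by simp only [beq_iff_eq]; intro h; exact hgi (he0.trans h)⟩
        rw [PySem.List.mem_pyRange_one]; omega
      · refine ⟨g i, List.mem_map_of_mem ?_,
          by simp only [beq_iff_eq]; intro h; exact he0 h.symm⟩
        rw [PySem.List.mem_pyRange_one]; omega
    · -- B true → A true
      intro hB
      rw [List.all_eq_true] at hB ⊢
      intro x hx
      rw [List.mem_map] at hx
      obtain ⟨i, hi, rfl⟩ := hx
      rw [PySem.List.mem_pyRange_one] at hi
      simp only [beq_iff_eq]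
      have hchain : ∀ k : Nat, k + 1 < (n - 1).toNat → g ((k : Int) + 1) = g (k : Int) := by
        intro k hk
        have hmem : ((k : Int) + 1) ∈ PySem.List.pyRange 1 (n - 1) 1 := by
          rw [PySem.List.mem_pyRange_one]; omega
        have hh := (hstep ((k : Int) + 1) (by omega) (by omega)).mp (hB _ hmem)
        simpa using hh
      have hfirst : ∀ k : Nat, k < (n - 1).toNat → g (k : Int) = g 0 :=
        pv_chain_to_first (fun k : Nat => g (k : Int)) (n - 1).toNat
          (by intro k hk; have := hchain k hk; push_cast; simpa using this)
      have hik : i = ((i.toNat : Nat) : Int) := by omega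
      rw [hik]
      exact (hfirst i.toNat (by omega)).symm

-- ===== VERDICT (by name: the statement is the Claim_ definition above) =====
theorem judge_num_spec : Claim_equal_judge_num := by
  intro num _
  unfold Spec_judge_num judge_num judge_num_alt
  by_cases h : num < 100
  · simp [h]
  · simp only [h, if_false]
    rw [PySem.List.foldl_append_singleton_eq_self, List.nil_append]
    exact pv_check_eq (PySem.Int.toChars num)
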